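-- pv_equiv track=rewrite | github.com/greivinlopez/coding-solutions | python/leetcode/problems_1500_1599/1509_minimum_difference_between_largest_and_smallest_value_in_three_moves.py | min_difference_first
-- ===== SOURCE A (Python) =====
-- def min_difference_first(nums):
--     if len(nums) <= 4:
--         return 0
--
--     nums.sort()
--     res = float("inf")
--
--     for l in range(4):
--         r = len(nums) - 4 + l
--         res = min(res, nums[r] - nums[l])
--
--     return res
-- ===== SOURCE B (Python) =====
-- # Alternative re-implementation: one pass keeps the 4 smallest (ascending) and the 4
-- # largest (descending); the answer only depends on those 8 values.
-- # Note: A sorts nums in place; B does not mutate its argument.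
--
-- def _ins_asc(lst, x):
--     # insert x into ascending lst at the leftmost position keeping it ascending
--     if not lst:
--         return [x]
--     if x <= lst[0]:
--         return [x] + lst
--     return [lst[0]] + _ins_asc(lst[1:], x)
--
-- def _ins_desc(lst, x):
--     # insert x into descending lst at the leftmost position keeping it descending
--     if not lst:
--         return [x]
--     if x >= lst[0]:
--         return [x] + lst
--     return [lst[0]] + _ins_desc(lst[1:], x)
--
-- def min_difference_first(nums):
--     if len(nums) <= 4:
--         return 0
--     small = []  # 4 smallest, ascending
--     big = []    # 4 largest, descending
--     for x in nums:
--         small = _ins_asc(small, x)[:4]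
--         big = _ins_desc(big, x)[:4]
--     res = big[0] - small[3]
--     for i in range(1, 4):
--         v = big[i] - small[3 - i]
--         if v < res:
--             res = v
--     return res
-- ===== Notes on version B (the rewrite author's own statement) =====
-- stated objective: alternative
-- what changed: B replaces the full sort with a single pass that maintains only the 4 smallest and 4 largest elements (bounded insertion lists) and takes the min over the 4 pairings; A sorts the whole list and indexes into it. (Asymptotically O(n) but not measurably faster in CPython, so no speed claim.)
import Mathlib
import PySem

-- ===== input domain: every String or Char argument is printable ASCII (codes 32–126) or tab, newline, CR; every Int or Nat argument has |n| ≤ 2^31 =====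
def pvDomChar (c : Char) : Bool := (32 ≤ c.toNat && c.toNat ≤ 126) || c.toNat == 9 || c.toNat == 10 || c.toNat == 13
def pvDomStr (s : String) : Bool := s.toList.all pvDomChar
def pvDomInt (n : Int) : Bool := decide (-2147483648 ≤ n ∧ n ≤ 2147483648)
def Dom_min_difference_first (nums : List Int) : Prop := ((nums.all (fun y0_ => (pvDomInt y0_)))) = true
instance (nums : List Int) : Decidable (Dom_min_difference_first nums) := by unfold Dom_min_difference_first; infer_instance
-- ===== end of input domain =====

-- B keeps only the 4 smallest / 4 largest elements in one pass instead of sorting the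
-- whole list (alternative algorithm; equivalence is about the return value only —
-- A sorts its argument in place, B does not mutate it).

-- ===== PORT A =====
-- nums.sort(); res = inf; for l in range(4): res = min(res, nums[len-4+l] - nums[l])
-- res : Option Int models float("inf") as none (min none v = v); the loop always runs
-- when len > 4, so the final getD default is never used.
def min_difference_first (nums : List Int) : Int :=
  if nums.length ≤ 4 then 0
  else
    let s := PySem.List.sorted nums (fun x => x) false
    let res := (PySem.List.pyRange 0 4 1).foldl
      (fun (res : Option Int) l =>
        let r : Int := (nums.length : Int) - 4 + l
        let v := PySem.List.pyGetD s r 0 - PySem.List.pyGetD s l 0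
        some (match res with | none => v | some m => min m v)) none
    res.getD 0

-- ===== PORT B =====
-- _ins_asc: recursive leftmost insertion into an ascending list
def pvInsAsc : List Int → Int → List Int
  | [], x => [x]
  | a :: t, x => if x ≤ a then x :: a :: t else a :: pvInsAsc t x

-- _ins_desc: recursive leftmost insertion into a descending list
def pvInsDesc : List Int → Int → List Int
  | [], x => [x]
  | a :: t, x => if a ≤ x then x :: a :: t else a :: pvInsDesc t x

def min_difference_first_alt (nums : List Int) : Int :=
  if nums.length ≤ 4 then 0
  else
    let p := nums.foldl (fun (p : List Int × List Int) x =>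
        ((pvInsAsc p.1 x).take 4, (pvInsDesc p.2 x).take 4)) ([], [])
    let small := p.1
    let big := p.2
    let res0 := PySem.List.pyGetD big 0 0 - PySem.List.pyGetD small 3 0
    (PySem.List.pyRange 1 4 1).foldl (fun res i =>
      let v := PySem.List.pyGetD big i 0 - PySem.List.pyGetD small (3 - i) 0
      if v < res then v else res) res0

-- ===== PRECONDITION & SPEC =====
def Spec_min_difference_first (nums : List Int) (out : Int) : Prop := out = min_difference_first_alt nums
instance (nums : List Int) (out : Int) : Decidable (Spec_min_difference_first nums out) := by unfold Spec_min_difference_first; infer_instance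

-- ===== CLAIM (what is proved, stated in full; the proofs are below) =====
def Claim_equal_min_difference_first : Prop := ∀ (nums : List Int), Dom_min_difference_first nums → Spec_min_difference_first nums (min_difference_first nums)

-- ===== LEMMAS AND PROOFS =====

-- membership in the insertion result
lemma mem_pvInsAsc {y x : Int} {l : List Int} : y ∈ pvInsAsc l x ↔ y = x ∨ y ∈ l := by
  induction l with
  | nil => simp [pvInsAsc]
  | cons a t ih =>
    simp only [pvInsAsc]
    split
    · simp
    · simp [ih]
      tauto

lemma mem_pvInsDesc {y x : Int} {l : List Int} : y ∈ pvInsDesc l x ↔ y = x ∨ y ∈ l := by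
  induction l with
  | nil => simp [pvInsDesc]
  | cons a t ih =>
    simp only [pvInsDesc]
    split
    · simp
    · simp [ih]
      tauto

-- insertion keeps the list a permutation of x :: l
lemma perm_pvInsAsc (x : Int) (l : List Int) : (pvInsAsc l x).Perm (x :: l) := by
  induction l with
  | nil => simp [pvInsAsc]
  | cons a t ih =>
    simp only [pvInsAsc]
    split
    · exact List.Perm.refl _
    · exact (List.Perm.cons a ih).trans (List.Perm.swap x a t)

lemma perm_pvInsDesc (x : Int) (l : List Int) : (pvInsDesc l x).Perm (x :: l) := by
  induction l with
  | nil => simp [pvInsDesc]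
  | cons a t ih =>
    simp only [pvInsDesc]
    split
    · exact List.Perm.refl _
    · exact (List.Perm.cons a ih).trans (List.Perm.swap x a t)

-- insertion preserves sortedness
lemma pairwise_pvInsAsc {x : Int} {l : List Int} (h : l.Pairwise (· ≤ ·)) :
    (pvInsAsc l x).Pairwise (· ≤ ·) := by
  induction l with
  | nil => simp [pvInsAsc]
  | cons a t ih =>
    rcases List.pairwise_cons.mp h with ⟨ha, ht⟩
    simp only [pvInsAsc]
    split
    · rename_i hxa
      refine List.pairwise_cons.mpr ⟨?_, h⟩
      intro y hy
      rcases List.mem_cons.mp hy with rfl | hy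
      · exact hxa
      · exact le_trans hxa (ha y hy)
    · rename_i hxa
      refine List.pairwise_cons.mpr ⟨?_, ih ht⟩
      intro y hy
      rcases mem_pvInsAsc.mp hy with rfl | hy
      · omega
      · exact ha y hy

lemma pairwise_pvInsDesc {x : Int} {l : List Int} (h : l.Pairwise (fun a b => b ≤ a)) :
    (pvInsDesc l x).Pairwise (fun a b => b ≤ a) := by
  induction l with
  | nil => simp [pvInsDesc]
  | cons a t ih =>
    rcases List.pairwise_cons.mp h with ⟨ha, ht⟩
    simp only [pvInsDesc]
    split
    · rename_i hax
      refine List.pairwise_cons.mpr ⟨?_, h⟩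
      intro y hy
      rcases List.mem_cons.mp hy with rfl | hy
      · exact hax
      · exact le_trans (ha y hy) hax
    · rename_i hax
      refine List.pairwise_cons.mpr ⟨?_, ih ht⟩
      intro y hy
      rcases mem_pvInsDesc.mp hy with rfl | hy
      · omega
      · exact ha y hy

-- truncation lemma: inserting into the 4-truncated list and truncating again
-- equals truncating the full insertion (holds for any k)
lemma take_pvInsAsc (l : List Int) (x : Int) (k : Nat) :
    (pvInsAsc (l.take k) x).take k = (pvInsAsc l x).take k := by
  induction l generalizing k with
  | nil => simp
  | cons a t ih =>
    cases k with
    | zero => simp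
    | succ j =>
      simp only [List.take_succ_cons, pvInsAsc]
      split
      · cases j with
        | zero => simp
        | succ m => simp [List.take_succ_cons, List.take_take]
      · simp [List.take_succ_cons, ih]

lemma take_pvInsDesc (l : List Int) (x : Int) (k : Nat) :
    (pvInsDesc (l.take k) x).take k = (pvInsDesc l x).take k := by
  induction l generalizing k with
  | nil => simp
  | cons a t ih =>
    cases k with
    | zero => simp
    | succ j =>
      simp only [List.take_succ_cons, pvInsDesc]
      split
      · cases j with
        | zero => simp
        | succ m => simp [List.take_succ_cons, List.take_take]
      · simp [List.take_succ_cons, ih]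

-- full (untruncated) insertion sorts
def pvSortA (l : List Int) : List Int := l.foldl pvInsAsc []
def pvSortD (l : List Int) : List Int := l.foldl pvInsDesc []

-- B's fold computes the truncations of the full insertion sorts
lemma fold_take (xs : List Int) (a b : List Int) :
    xs.foldl (fun (p : List Int × List Int) x =>
        ((pvInsAsc p.1 x).take 4, (pvInsDesc p.2 x).take 4)) (a.take 4, b.take 4)
    = ((xs.foldl pvInsAsc a).take 4, (xs.foldl pvInsDesc b).take 4) := by
  induction xs generalizing a b with
  | nil => rfl
  | cons x xs ih =>
    simp only [List.foldl_cons]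
    rw [take_pvInsAsc, take_pvInsDesc, ih]

lemma foldl_insAsc_perm (xs a : List Int) : (xs.foldl pvInsAsc a).Perm (xs ++ a) := by
  induction xs generalizing a with
  | nil => simp
  | cons x xs ih =>
    simp only [List.foldl_cons, List.cons_append]
    exact (ih (pvInsAsc a x)).trans
      ((List.Perm.append_left xs (perm_pvInsAsc x a)).trans List.perm_middle)

lemma foldl_insDesc_perm (xs a : List Int) : (xs.foldl pvInsDesc a).Perm (xs ++ a) := by
  induction xs generalizing a with
  | nil => simp
  | cons x xs ih =>
    simp only [List.foldl_cons, List.cons_append]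
    exact (ih (pvInsDesc a x)).trans
      ((List.Perm.append_left xs (perm_pvInsDesc x a)).trans List.perm_middle)

lemma foldl_insAsc_pairwise (xs : List Int) {a : List Int} (h : a.Pairwise (· ≤ ·)) :
    (xs.foldl pvInsAsc a).Pairwise (· ≤ ·) := by
  induction xs generalizing a with
  | nil => exact h
  | cons x xs ih => exact ih (pairwise_pvInsAsc h)

lemma foldl_insDesc_pairwise (xs : List Int) {a : List Int} (h : a.Pairwise (fun a b => b ≤ a)) :
    (xs.foldl pvInsDesc a).Pairwise (fun a b => b ≤ a) := by
  induction xs generalizing a with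
  | nil => exact h
  | cons x xs ih => exact ih (pairwise_pvInsDesc h)

-- the ascending insertion sort IS PySem's sorted
lemma pvSortA_eq (nums : List Int) :
    PySem.List.sorted nums (fun x => x) false = pvSortA nums := by
  apply PySem.List.sorted_id_eq_of_perm_of_pairwise
  · simpa using foldl_insAsc_perm nums []
  · exact foldl_insAsc_pairwise nums (by simp)

-- the descending insertion sort is its reverse
lemma pvSortD_eq (nums : List Int) :
    pvSortD nums = (PySem.List.sorted nums (fun x => x) false).reverse := by
  have h1 : (pvSortD nums).Perm nums := by simpa using foldl_insDesc_perm nums []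
  have h2 : ((PySem.List.sorted nums (fun x => x) false).reverse).Perm nums :=
    (List.reverse_perm _).trans (PySem.List.sorted_perm _ _ _)
  have hp : (pvSortD nums).Perm ((PySem.List.sorted nums (fun x => x) false).reverse) :=
    h1.trans h2.symm
  have s1 : (pvSortD nums).Pairwise (fun a b => b ≤ a) := foldl_insDesc_pairwise nums (by simp)
  have s2 : ((PySem.List.sorted nums (fun x => x) false).reverse).Pairwise (fun a b => b ≤ a) := by
    rw [List.pairwise_reverse]
    simpa using PySem.List.sorted_pairwise nums (fun x => x)
  exact hp.eq_of_pairwise (fun a b _ _ h1 h2 => by omega) s1 s2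


-- index helpers used in the final computation
lemma pvGetD_int (xs : List Int) (i : Int) (n : Nat) (h : i = (n : Int)) (d : Int) :
    PySem.List.pyGetD xs i d = xs.getD n d := by
  subst h; simp

lemma pvGetD_take (l : List Int) (n : Nat) (h : n < 4) (d : Int) :
    (l.take 4).getD n d = l.getD n d := by
  simp [List.getD_eq_getElem?_getD, h]

lemma pvGetD_reverse (l : List Int) (n : Nat) (h : n < l.length) (d : Int) :
    l.reverse.getD n d = l.getD (l.length - 1 - n) d := by
  rw [List.getD_eq_getElem?_getD, List.getD_eq_getElem?_getD, List.getElem?_reverse h]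

-- ===== VERDICT (by name: the statement is the Claim_ definition above) =====
theorem min_difference_first_spec : Claim_equal_min_difference_first := by
  intro nums _
  unfold Spec_min_difference_first min_difference_first min_difference_first_alt
  by_cases h : nums.length ≤ 4
  · simp [h]
  · simp only [h, reduceIte]
    have hn : 5 ≤ nums.length := by omega
    have hfold : nums.foldl (fun (p : List Int × List Int) x =>
        ((pvInsAsc p.1 x).take 4, (pvInsDesc p.2 x).take 4)) ([], [])
        = ((pvSortA nums).take 4, (pvSortD nums).take 4) := by
      simpa using fold_take nums [] []
    rw [hfold, pvSortD_eq, ← pvSortA_eq]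
    set s := PySem.List.sorted nums (fun x => x) false with hsdef
    have hsl : s.length = nums.length := PySem.List.length_sorted nums _ _
    have hr0 : PySem.List.pyRange 0 4 1 = [0, 1, 2, 3] := by decide
    have hr1 : PySem.List.pyRange 1 4 1 = [1, 2, 3] := by decide
    rw [hr0, hr1]
    simp only [List.foldl_cons, List.foldl_nil]
    rw [pvGetD_int s ((nums.length : Int) - 4 + 0) (nums.length - 4 + 0) (by push_cast; omega),
        pvGetD_int s ((nums.length : Int) - 4 + 1) (nums.length - 4 + 1) (by push_cast; omega),
        pvGetD_int s ((nums.length : Int) - 4 + 2) (nums.length - 4 + 2) (by push_cast; omega),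
        pvGetD_int s ((nums.length : Int) - 4 + 3) (nums.length - 4 + 3) (by push_cast; omega),
        pvGetD_int s 0 0 (by norm_num), pvGetD_int s 1 1 (by norm_num),
        pvGetD_int s 2 2 (by norm_num), pvGetD_int s 3 3 (by norm_num),
        pvGetD_int (List.take 4 s.reverse) 0 0 (by norm_num),
        pvGetD_int (List.take 4 s.reverse) 1 1 (by norm_num),
        pvGetD_int (List.take 4 s.reverse) 2 2 (by norm_num),
        pvGetD_int (List.take 4 s.reverse) 3 3 (by norm_num),
        pvGetD_int (List.take 4 s) (3 - 3) 0 (by norm_num),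
        pvGetD_int (List.take 4 s) (3 - 2) 1 (by norm_num),
        pvGetD_int (List.take 4 s) (3 - 1) 2 (by norm_num),
        pvGetD_int (List.take 4 s) 3 3 (by norm_num)]
    rw [pvGetD_take s 0 (by omega), pvGetD_take s.reverse 0 (by omega),
        pvGetD_take s 1 (by omega), pvGetD_take s.reverse 1 (by omega),
        pvGetD_take s 2 (by omega), pvGetD_take s.reverse 2 (by omega),
        pvGetD_take s 3 (by omega), pvGetD_take s.reverse 3 (by omega)]
    rw [pvGetD_reverse s 0 (by omega), pvGetD_reverse s 1 (by omega),
        pvGetD_reverse s 2 (by omega), pvGetD_reverse s 3 (by omega)]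
    rw [show s.length - 1 - 0 = nums.length - 4 + 3 by omega,
        show s.length - 1 - 1 = nums.length - 4 + 2 by omega,
        show s.length - 1 - 2 = nums.length - 4 + 1 by omega,
        show s.length - 1 - 3 = nums.length - 4 + 0 by omega]
    simp only [Option.getD_some, min_def]
    split_ifs <;> omega
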